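-- pv_equiv track=rewrite | github.com/philipesantos/metta-rift-server | core/metta_doc_catalog.py | _top_level_expression_ranges
-- ===== SOURCE A (Python) =====
-- def _top_level_expression_ranges(metta: str) -> list[tuple[int, int]]:
--     ranges: list[tuple[int, int]] = []
--     depth = 0
--     start: int | None = None
--     in_string = False
--     escaping = False
--
--     for index, char in enumerate(metta):
--         if in_string:
--             if escaping:
--                 escaping = False
--             elif char == "\\":
--                 escaping = True
--             elif char == '"':
--                 in_string = False
--             continue
--
--         if char == '"':
--             in_string = True
--             continue
--
--         if char == "(":
--             if depth == 0:
--                 start = index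
--             depth += 1
--             continue
--
--         if char != ")":
--             continue
--
--         if depth == 0:
--             continue
--
--         depth -= 1
--         if depth == 0 and start is not None:
--             ranges.append((start, index + 1))
--             start = None
--
--     return ranges
-- ===== SOURCE B (Python) =====
-- def _top_level_expression_ranges(metta: str) -> list[tuple[int, int]]:
--     # Pass 1: mark which characters are code (not inside/starting a string literal).
--     n = len(metta)
--     is_code = [False] * n
--     in_string = False
--     escaping = False
--     for i, ch in enumerate(metta):
--         if in_string:
--             if escaping:
--                 escaping = False
--             elif ch == "\\":
--                 escaping = True
--             elif ch == '"':
--                 in_string = False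
--         elif ch == '"':
--             in_string = True
--         else:
--             is_code[i] = True
--
--     # Pass 2: paren-depth tracking over code characters only.
--     ranges: list[tuple[int, int]] = []
--     depth = 0
--     start = 0
--     for i, ch in enumerate(metta):
--         if not is_code[i]:
--             continue
--         if ch == "(":
--             if depth == 0:
--                 start = i
--             depth += 1
--         elif ch == ")" and depth > 0:
--             depth -= 1
--             if depth == 0:
--                 ranges.append((start, i + 1))
--     return ranges
-- ===== Notes on version B (the rewrite author's own statement) =====
-- stated objective: alternative
-- what changed: Split the single fused state machine into two passes: pass 1 builds a boolean is_code mask via the string/escape scanner, pass 2 does pure paren-depth tracking over the mask with a plain int start (no Optional and no fused string state).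
import Mathlib
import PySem

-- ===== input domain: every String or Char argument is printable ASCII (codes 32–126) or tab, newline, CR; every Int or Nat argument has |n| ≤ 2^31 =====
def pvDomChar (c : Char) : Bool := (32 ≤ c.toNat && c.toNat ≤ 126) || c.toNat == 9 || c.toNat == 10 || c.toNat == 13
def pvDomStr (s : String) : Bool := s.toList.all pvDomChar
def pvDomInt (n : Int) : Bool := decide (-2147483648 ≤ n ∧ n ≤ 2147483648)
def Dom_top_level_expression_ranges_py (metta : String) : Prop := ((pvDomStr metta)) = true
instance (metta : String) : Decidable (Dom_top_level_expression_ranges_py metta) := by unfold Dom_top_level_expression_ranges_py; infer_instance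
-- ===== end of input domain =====

-- B replaces A's single fused scanner with two passes (an is_code mask, then pure paren-depth tracking); alternative decomposition, same O(n) cost.


-- ===== PORT A =====
-- Single fused state machine: string/escape state and paren depth tracked in one loop (as in A).
def pvALoop : List Char → Int → List (Int × Int) → Int → Option Int → Bool → Bool → List (Int × Int)
  | [], _, ranges, _, _, _, _ => ranges
  | c :: rest, i, ranges, depth, start, inString, escaping =>
    if inString then
      if escaping then pvALoop rest (i+1) ranges depth start inString false
      else if c = '\\' then pvALoop rest (i+1) ranges depth start inString true
      else if c = '"' then pvALoop rest (i+1) ranges depth start false escaping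
      else pvALoop rest (i+1) ranges depth start inString escaping
    else if c = '"' then pvALoop rest (i+1) ranges depth start true escaping
    else if c = '(' then
      pvALoop rest (i+1) ranges (depth+1) (if depth = 0 then some i else start) inString escaping
    else if c ≠ ')' then pvALoop rest (i+1) ranges depth start inString escaping
    else if depth = 0 then pvALoop rest (i+1) ranges depth start inString escaping
    else
      if depth - 1 = 0 then
        match start with
        | some s => pvALoop rest (i+1) (ranges ++ [(s, i+1)]) (depth-1) none inString escaping
        | none => pvALoop rest (i+1) ranges (depth-1) none inString escaping
      else pvALoop rest (i+1) ranges (depth-1) start inString escaping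

def top_level_expression_ranges_py (metta : String) : List (Int × Int) :=
  pvALoop metta.toList 0 [] 0 none false false

-- ===== PORT B =====
-- Pass 1 of B: the is_code mask (true exactly for characters outside string literals).
def pvBMask : List Char → Bool → Bool → List Bool
  | [], _, _ => []
  | c :: rest, inString, escaping =>
    if inString then
      if escaping then false :: pvBMask rest inString false
      else if c = '\\' then false :: pvBMask rest inString true
      else if c = '"' then false :: pvBMask rest false escaping
      else false :: pvBMask rest inString escaping
    else if c = '"' then false :: pvBMask rest true escaping
    else true :: pvBMask rest inString escaping

-- Pass 2 of B: pure paren-depth tracking over the masked characters.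
def pvBLoop : List Char → List Bool → Int → List (Int × Int) → Int → Int → List (Int × Int)
  | c :: cs, m :: ms, i, ranges, depth, start =>
    if m = false then pvBLoop cs ms (i+1) ranges depth start
    else if c = '(' then
      pvBLoop cs ms (i+1) ranges (depth+1) (if depth = 0 then i else start)
    else if c = ')' ∧ 0 < depth then
      if depth - 1 = 0 then pvBLoop cs ms (i+1) (ranges ++ [(start, i+1)]) (depth-1) start
      else pvBLoop cs ms (i+1) ranges (depth-1) start
    else pvBLoop cs ms (i+1) ranges depth start
  | _, _, _, ranges, _, _ => ranges

def top_level_expression_ranges_py_alt (metta : String) : List (Int × Int) :=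
  pvBLoop metta.toList (pvBMask metta.toList false false) 0 [] 0 0

-- ===== PRECONDITION & SPEC =====
def Spec_top_level_expression_ranges_py (metta : String) (out : List (Int × Int)) : Prop := out = top_level_expression_ranges_py_alt metta
instance (metta : String) (out : List (Int × Int)) : Decidable (Spec_top_level_expression_ranges_py metta out) := by unfold Spec_top_level_expression_ranges_py; infer_instance

-- ===== CLAIM (what is proved, stated in full; the proofs are below) =====
def Claim_equal_top_level_expression_ranges_py : Prop := ∀ (metta : String), Dom_top_level_expression_ranges_py metta → Spec_top_level_expression_ranges_py metta (top_level_expression_ranges_py metta)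

-- ===== LEMMAS AND PROOFS =====

-- A's fused loop equals B's mask-then-depth loops for any start state, provided depth is
-- nonnegative and A's optional start matches B's int start whenever depth is positive.
theorem pvLoop_eq (cs : List Char) (i : Int) (ranges : List (Int × Int)) (depth : Int)
    (startA : Option Int) (startB : Int) (inString escaping : Bool)
    (hd : 0 ≤ depth) (hs : 0 < depth → startA = some startB) :
    pvALoop cs i ranges depth startA inString escaping
      = pvBLoop cs (pvBMask cs inString escaping) i ranges depth startB := by
  induction cs generalizing i ranges depth startA startB inString escaping with
  | nil => simp [pvALoop, pvBLoop]
  | cons c rest ih =>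
    cases inString with
    | true =>
      cases escaping with
      | true =>
        simpa [pvALoop, pvBMask, pvBLoop] using ih (i+1) ranges depth startA startB true false hd hs
      | false =>
        by_cases h1 : c = '\\'
        · simpa [pvALoop, pvBMask, pvBLoop, h1] using
            ih (i+1) ranges depth startA startB true true hd hs
        by_cases h2 : c = '"'
        · simpa [pvALoop, pvBMask, pvBLoop, h1, h2] using
            ih (i+1) ranges depth startA startB false false hd hs
        · simpa [pvALoop, pvBMask, pvBLoop, h1, h2] using
            ih (i+1) ranges depth startA startB true false hd hs
    | false =>
      by_cases h2 : c = '"'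
      · simpa [pvALoop, pvBMask, pvBLoop, h2] using
          ih (i+1) ranges depth startA startB true escaping hd hs
      by_cases h3 : c = '('
      · have hs' : 0 < depth + 1 → (if depth = 0 then some i else startA)
            = some (if depth = 0 then i else startB) := by
          intro _
          by_cases h0 : depth = 0
          · simp [h0]
          · simp [h0, hs (lt_of_le_of_ne hd (Ne.symm h0))]
        simpa [pvALoop, pvBMask, pvBLoop, h2, h3] using
          ih (i+1) ranges (depth+1) _ _ false escaping (by omega) hs'
      by_cases h4 : c = ')'
      · by_cases h0 : depth = 0
        · simpa [pvALoop, pvBMask, pvBLoop, h2, h3, h4, h0] using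
            ih (i+1) ranges depth startA startB false escaping hd hs
        · have hpos : 0 < depth := lt_of_le_of_ne hd (Ne.symm h0)
          have hsa := hs hpos
          by_cases h5 : depth - 1 = 0
          · simpa [pvALoop, pvBMask, pvBLoop, h2, h3, h4, h0, hpos, h5, hsa] using
              ih (i+1) (ranges ++ [(startB, i+1)]) (depth-1) none startB false escaping
                (by omega) (by omega)
          · simpa [pvALoop, pvBMask, pvBLoop, h2, h3, h4, h0, hpos, h5, hsa] using
              ih (i+1) ranges (depth-1) (some startB) startB false escaping
                (by omega) (fun _ => rfl)
      · simpa [pvALoop, pvBMask, pvBLoop, h2, h3, h4] using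
          ih (i+1) ranges depth startA startB false escaping hd hs

-- ===== VERDICT (by name: the statement is the Claim_ definition above) =====
theorem top_level_expression_ranges_py_spec : Claim_equal_top_level_expression_ranges_py := by
  intro metta _
  unfold Spec_top_level_expression_ranges_py top_level_expression_ranges_py top_level_expression_ranges_py_alt
  exact pvLoop_eq metta.toList 0 [] 0 none 0 false false le_rfl (by omega)
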